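-- pv_equiv track=rewrite | github.com/nomelancholy/problem_solving | 프로그래머스/unrated/181918. 배열 만들기 4/배열 만들기 4.py | solution
-- ===== SOURCE A (Python) =====
-- def solution(arr):
--     stk = []
--
--     i = 0
--
--     while i < len(arr):
--         if stk:
--             if stk[-1] < arr[i]:
--                 stk.append(arr[i])
--                 i += 1
--             else:
--                 stk = stk[:-1]
--         else:
--             stk.append(arr[i])
--             i += 1
--
--
--     return stk
-- ===== SOURCE B (Python) =====
-- def solution(arr):
--     res = []
--     running_min = None
--     for x in reversed(arr):
--         if running_min is None or x < running_min:
--             res.append(x)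
--             running_min = x
--     return res[::-1]
-- ===== Notes on version B (the rewrite author's own statement) =====
-- stated objective: faster
-- what changed: Replaces the while-loop stack simulation (with repeated stk[:-1] list copies) by a single right-to-left pass keeping each element that is strictly below the running minimum of all later elements.
import Mathlib
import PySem

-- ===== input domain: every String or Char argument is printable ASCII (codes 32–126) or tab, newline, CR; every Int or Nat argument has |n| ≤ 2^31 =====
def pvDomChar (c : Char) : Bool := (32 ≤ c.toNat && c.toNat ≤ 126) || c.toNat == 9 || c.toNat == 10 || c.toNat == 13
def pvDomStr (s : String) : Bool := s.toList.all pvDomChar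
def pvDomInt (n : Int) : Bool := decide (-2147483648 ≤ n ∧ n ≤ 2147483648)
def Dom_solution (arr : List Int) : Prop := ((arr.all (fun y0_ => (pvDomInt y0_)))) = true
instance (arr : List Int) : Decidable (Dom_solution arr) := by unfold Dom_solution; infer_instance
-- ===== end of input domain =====

-- B replaces A's stack simulation by one right-to-left running-minimum pass (equal return values; A mutates nothing observable).

-- ===== PORT A =====
-- A's while-loop over (stk, i); the stack is kept top-first, so Python's
-- stk.append(x) / stk[-1] / stk[:-1] become x :: stk / head / tail, and the
-- returned bottom-to-top stack is the final reverse.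
def solutionLoopA : List Int → List Int → List Int
  | stk, [] => stk
  | [], x :: xs => solutionLoopA [x] xs
  | t :: rest, x :: xs =>
    if t < x then solutionLoopA (x :: t :: rest) xs
    else solutionLoopA rest (x :: xs)
termination_by stk xs => 2 * xs.length + stk.length

def solution (arr : List Int) : List Int := (solutionLoopA [] arr).reverse

-- ===== PORT B =====
-- Source B's loop over reversed(arr): res accumulates, running_min is None or the min so far.
def solutionLoopB : List Int → List Int → Option Int → List Int
  | [], res, _ => res
  | x :: xs, res, m =>
    if (match m with | none => true | some v => decide (x < v)) then
      solutionLoopB xs (res ++ [x]) (some x)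
    else
      solutionLoopB xs res m

def solution_alt (arr : List Int) : List Int := (solutionLoopB arr.reverse [] none).reverse

-- ===== PRECONDITION & SPEC =====
def Spec_solution (arr : List Int) (out : List Int) : Prop := out = solution_alt arr
instance (arr : List Int) (out : List Int) : Decidable (Spec_solution arr out) := by unfold Spec_solution; infer_instance

-- ===== CLAIM (what is proved, stated in full; the proofs are below) =====
def Claim_equal_solution : Prop := ∀ (arr : List Int), Dom_solution arr → Spec_solution arr (solution arr)

-- ===== LEMMAS AND PROOFS =====

-- x < m, with none = +infinity
def pvLtm (x : Int) (m : Option Int) : Bool := match m with | none => true | some v => decide (x < v)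

-- min m x, with none = +infinity
def pvMinm (m : Option Int) (z : Int) : Option Int := some (match m with | none => z | some v => min v z)

-- B's loop with the accumulator stripped
def pvPick : List Int → Option Int → List Int
  | [], _ => []
  | x :: xs, m => if pvLtm x m then x :: pvPick xs (some x) else pvPick xs m

-- common characterization: keep x iff x < every later element and x < m
def pvSfm : List Int → Option Int → List Int
  | [], _ => []
  | x :: xs, m =>
    if (xs.all (fun y => decide (x < y)) && pvLtm x m) then x :: pvSfm xs m else pvSfm xs m

theorem pvLoopB_eq (ys : List Int) : ∀ (res : List Int) (m : Option Int),
    solutionLoopB ys res m = res ++ pvPick ys m := by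
  induction ys with
  | nil => intro res m; simp [solutionLoopB, pvPick]
  | cons x xs ih =>
    intro res m
    simp only [solutionLoopB, pvPick, pvLtm]
    cases m with
    | none => simp [ih]
    | some v =>
      by_cases h : x < v
      · simp [h, ih]
      · simp [h, ih]

theorem pvSfm_append (z : Int) : ∀ (ys : List Int) (m : Option Int),
    pvSfm (ys ++ [z]) m = pvSfm ys (pvMinm m z) ++ (if pvLtm z m then [z] else []) := by
  intro ys
  induction ys with
  | nil =>
    intro m; simp [pvSfm]
  | cons y ys ih =>
    intro m
    have hcond : (((ys ++ [z]).all (fun w => decide (y < w))) && pvLtm y m)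
        = ((ys.all (fun w => decide (y < w))) && pvLtm y (pvMinm m z)) := by
      cases m with
      | none => simp [pvLtm, pvMinm, Bool.and_comm]
      | some v =>
        simp only [List.all_append, List.all_cons, List.all_nil, pvLtm, pvMinm]
        by_cases h1 : y < z <;> by_cases h2 : y < v <;>
          simp [h1, h2, Bool.and_comm]
    simp only [List.cons_append, pvSfm, hcond, ih]
    by_cases h : (ys.all (fun w => decide (y < w)) && pvLtm y (pvMinm m z)) = true <;> simp [h]

theorem pvPick_reverse (xs : List Int) : ∀ (m : Option Int),
    pvPick xs.reverse m = (pvSfm xs m).reverse := by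
  induction xs using List.reverseRecOn with
  | nil => intro m; simp [pvPick, pvSfm]
  | append_singleton ys z ih =>
    intro m
    rw [pvSfm_append]
    simp only [List.reverse_append, List.reverse_cons, List.reverse_nil, List.nil_append]
    rw [pvPick.eq_def]
    by_cases h : pvLtm z m = true
    · have hmin : pvMinm m z = some z := by
        cases m with
        | none => simp [pvMinm]
        | some v =>
          simp only [pvLtm, decide_eq_true_eq] at h
          simp [pvMinm, min_eq_right (le_of_lt h)]
      simp [h, ih, hmin]
    · have hmin : pvMinm m z = m := by
        cases m with
        | none => simp [pvLtm] at h
        | some v =>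
          simp only [pvLtm, decide_eq_true_eq] at h
          simp [pvMinm, min_eq_left (le_of_not_gt h)]
      simp [h, ih, hmin]

theorem pvLoopA_eq : ∀ (stk xs : List Int),
    List.Pairwise (fun a b => b < a) stk →
    solutionLoopA stk xs
      = (pvSfm xs none).reverse ++ stk.filter (fun e => xs.all (fun y => decide (e < y))) := by
  intro stk xs
  induction stk, xs using solutionLoopA.induct with
  | case1 stk =>
    intro _
    simp [solutionLoopA, pvSfm, List.filter_eq_self.mpr]
  | case2 x xs ih =>
    intro _
    have h1 : List.Pairwise (fun a b : Int => b < a) [x] := by simp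
    rw [solutionLoopA, ih h1]
    simp only [pvSfm, pvLtm, Bool.and_true, List.append_nil, List.filter]
    by_cases h : (xs.all (fun y => decide (x < y))) = true <;> simp [h]
  | case3 t rest x xs htx ih =>
    intro hp
    have hlt : ∀ e ∈ t :: rest, e < x := by
      intro e he
      rcases List.mem_cons.mp he with rfl | he'
      · exact htx
      · exact lt_trans (List.rel_of_pairwise_cons hp he') htx
    have hp' : List.Pairwise (fun a b : Int => b < a) (x :: t :: rest) :=
      List.pairwise_cons.mpr ⟨hlt, hp⟩
    rw [solutionLoopA, if_pos htx, ih hp']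
    have hfc : (t :: rest).filter (fun e => xs.all (fun y => decide (e < y)))
        = (t :: rest).filter (fun e => (x :: xs).all (fun y => decide (e < y))) := by
      apply List.filter_congr
      intro e he
      simp [hlt e he]
    simp only [List.filter_cons, hfc]
    simp only [pvSfm, pvLtm, Bool.and_true]
    by_cases h : (xs.all (fun y => decide (x < y))) = true <;> simp [h]
  | case4 t rest x xs htx ih =>
    intro hp
    rw [solutionLoopA, if_neg htx, ih (List.Pairwise.of_cons hp)]
    have : ((x :: xs).all (fun y => decide (t < y))) = false := by
      simp only [List.all_cons, Bool.and_eq_false_iff]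
      left; simpa using htx
    simp only [List.filter_cons, this, Bool.false_eq_true, if_false]

-- ===== VERDICT (by name: the statement is the Claim_ definition above) =====
theorem solution_spec : Claim_equal_solution := by
  intro arr _
  unfold Spec_solution solution solution_alt
  rw [pvLoopB_eq, pvPick_reverse, pvLoopA_eq [] arr List.Pairwise.nil]
  simp
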